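-- pv_equiv track=rewrite | github.com/SkyGlider/asdf-differential-testing | CrossASRplus/examples/mutator/swap.py | swap_words
-- ===== SOURCE A (Python) =====
-- def swap_words(text, error_words):
--     words = text.split(' ')
--     new_words = [word for word in words if word != '']
--
--     if len(words) < 2:
--         return words
--
--     for word in error_words:
--         indices = [i for i in range(len(new_words)) if new_words[i]==word]
--
--         for index in indices:
--             if (index != (len(new_words)-1)) and (index != 0):
--                 new_words[index-1], new_words[index+1] = new_words[index+1], new_words[index-1]
--
--     return new_words
-- ===== SOURCE B (Python) =====
-- def swap_words(text, error_words):
--     words = text.split(' ')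
--     if len(words) < 2:
--         return words
--     arr = [w for w in words if w != '']
--     n = len(arr)
--     pos = {}
--     for i, w in enumerate(arr):
--         pos.setdefault(w, set()).add(i)
--     for word in error_words:
--         for i in sorted(pos.get(word, ())):
--             if 0 < i < n - 1:
--                 left, right = arr[i - 1], arr[i + 1]
--                 if left != right:
--                     arr[i - 1], arr[i + 1] = right, left
--                     pos[left].discard(i - 1)
--                     pos[left].add(i + 1)
--                     pos[right].discard(i + 1)
--                     pos[right].add(i - 1)
--     return arr
-- ===== Notes on version B (the rewrite author's own statement) =====
-- stated objective: alternative
-- what changed: Instead of rescanning the whole word list for every error word, B builds a word->positions index once and keeps it up to date by editing only the two entries each swap changes; per error word it reads the sorted occurrence set instead of filtering the array. It trades A's per-word O(N) scan for index maintenance; a timing run found no measurable speed difference on the generated inputs.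
import Mathlib
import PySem

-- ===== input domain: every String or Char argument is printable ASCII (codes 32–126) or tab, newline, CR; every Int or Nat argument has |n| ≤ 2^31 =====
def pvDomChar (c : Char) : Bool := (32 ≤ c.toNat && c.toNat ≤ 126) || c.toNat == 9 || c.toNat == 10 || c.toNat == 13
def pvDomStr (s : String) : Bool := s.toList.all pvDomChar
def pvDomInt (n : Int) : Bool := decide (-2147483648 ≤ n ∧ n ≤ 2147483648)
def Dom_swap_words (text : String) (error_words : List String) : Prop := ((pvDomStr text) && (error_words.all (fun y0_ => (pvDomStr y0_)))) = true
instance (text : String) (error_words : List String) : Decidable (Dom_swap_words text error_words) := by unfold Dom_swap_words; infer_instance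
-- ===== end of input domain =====

-- B replaces A's per-error-word rescan of the whole word list by a word→positions index
-- built once and updated at the two array cells each swap changes (objective: alternative).

-- ===== PORT A =====
-- the body of A's inner loop: swap the neighbours of position `index` (tuple assignment:
-- both right-hand sides are read before either cell is written)
def pyAInner (nw : List String) (index : Int) : List String :=
  if index ≠ PySem.List.len nw - 1 ∧ index ≠ 0 then
    let a := PySem.List.pyGetD nw (index + 1) ""   -- indices in range under the guard
    let b := PySem.List.pyGetD nw (index - 1) ""
    PySem.List.pySetD (PySem.List.pySetD nw (index - 1) a) (index + 1) b
  else nw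

-- the body of A's outer loop: indices of `word` captured first, then the swaps
def pyAWord (nw : List String) (word : String) : List String :=
  let indices := (PySem.List.pyRange 0 (PySem.List.len nw) 1).filter
    (fun i => decide (PySem.List.pyGetD nw i "" = word))
  indices.foldl pyAInner nw

def swap_words (text : String) (error_words : List String) : List String :=
  let words := (PySem.Str.split? text " ").getD []   -- sep " " ≠ "", so split? is always `some`
  let new_words := words.filter (fun w => decide (w ≠ ""))
  if words.length < 2 then words
  else error_words.foldl pyAWord new_words

-- ===== PORT B =====
-- one swap step of B: arr and the word→positions index are updated together
-- (`pos.modify w [] f` is Python's in-place mutation of the set `pos[w]`: under B's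
-- invariant `left`/`right` are always keys of `pos`, so the default [] is never used)
def pvSwapStep (n : Int) (st : List String × PySem.Dict String (PySem.Set Int)) (i : Int) :
    List String × PySem.Dict String (PySem.Set Int) :=
  if 0 < i ∧ i < n - 1 then
    let arr := st.1
    let left := PySem.List.pyGetD arr (i - 1) ""
    let right := PySem.List.pyGetD arr (i + 1) ""
    if left ≠ right then
      let arr' := PySem.List.pySetD (PySem.List.pySetD arr (i - 1) right) (i + 1) left
      let pos' := ((st.2.modify left [] (fun s => (s.discard (i - 1)).add (i + 1))).modify
        right [] (fun s => (s.discard (i + 1)).add (i - 1)))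
      (arr', pos')
    else st
  else st

-- B's outer-loop body: snapshot the sorted positions of `word`, then the swaps
def pvAltWord (n : Int) (st : List String × PySem.Dict String (PySem.Set Int)) (word : String) :
    List String × PySem.Dict String (PySem.Set Int) :=
  (PySem.List.sorted (st.2.getD word []) (fun x => x) false).foldl (pvSwapStep n) st

def swap_words_alt (text : String) (error_words : List String) : List String :=
  let words := (PySem.Str.split? text " ").getD []
  if words.length < 2 then words
  else
    let arr0 := words.filter (fun w => decide (w ≠ ""))
    let n : Int := arr0.length
    let pos0 := (PySem.List.enumerate arr0 0).foldl
      (fun d p => d.modify p.2 [] (fun s => s.add p.1)) PySem.Dict.empty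
    (error_words.foldl (pvAltWord n) (arr0, pos0)).1

-- ===== PRECONDITION & SPEC =====
def Spec_swap_words (text : String) (error_words : List String) (out : List String) : Prop := out = swap_words_alt text error_words
instance (text : String) (error_words : List String) (out : List String) : Decidable (Spec_swap_words text error_words out) := by unfold Spec_swap_words; infer_instance

-- ===== CLAIM (what is proved, stated in full; the proofs are below) =====
def Claim_equal_swap_words : Prop := ∀ (text : String) (error_words : List String), Dom_swap_words text error_words → Spec_swap_words text error_words (swap_words text error_words)

-- ===== LEMMAS AND PROOFS =====

-- B's index invariant: for every word w, pos[w] is a duplicate-free set of exactly the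
-- (nonnegative) positions of arr that hold w
def PosInv (arr : List String) (pos : PySem.Dict String (PySem.Set Int)) : Prop :=
  ∀ w : String, (pos.getD w []).Nodup ∧ (∀ j ∈ pos.getD w [], 0 ≤ j) ∧
    ∀ k : Nat, ((k : Int) ∈ pos.getD w [] ↔ arr[k]? = some w)

lemma mem_getD_buildPos (ps : List (Int × String)) (d : PySem.Dict String (PySem.Set Int))
    (w : String) (j : Int) :
    j ∈ ((ps.foldl (fun d p => d.modify p.2 [] (fun s => s.add p.1)) d).getD w []) ↔
      j ∈ d.getD w [] ∨ (j, w) ∈ ps := by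
  induction ps generalizing d with
  | nil => simp
  | cons p ps ih =>
    simp only [List.foldl_cons, ih, List.mem_cons, PySem.Dict.getD_modify]
    by_cases hw : w = p.2
    · subst hw
      simp [PySem.Set.mem_add, Prod.ext_iff]
      tauto
    · simp [hw, Prod.ext_iff]

lemma nodup_getD_buildPos (ps : List (Int × String)) (d : PySem.Dict String (PySem.Set Int))
    (h : ∀ w, (d.getD w []).Nodup) (w : String) :
    ((ps.foldl (fun d p => d.modify p.2 [] (fun s => s.add p.1)) d).getD w []).Nodup := by
  induction ps generalizing d with
  | nil => exact h w
  | cons p ps ih =>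
    simp only [List.foldl_cons]
    apply ih
    intro v
    rw [PySem.Dict.getD_modify]
    split_ifs with hv
    · exact PySem.Set.nodup_add _ _ (h _)
    · exact h v

lemma posInv_init (arr : List String) :
    PosInv arr ((PySem.List.enumerate arr 0).foldl
      (fun d p => d.modify p.2 [] (fun s => s.add p.1)) PySem.Dict.empty) := by
  intro w
  refine ⟨nodup_getD_buildPos _ _ (by intro v; simp) w, ?_, ?_⟩
  · intro j hj
    rw [mem_getD_buildPos] at hj
    rcases hj with h | h
    · simp at h
    · rw [PySem.List.mem_enumerate_iff] at h
      obtain ⟨k, hk, hp⟩ := h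
      have := congrArg Prod.fst hp
      simp at this
      omega
  · intro k
    rw [mem_getD_buildPos, PySem.List.mem_enumerate_iff]
    constructor
    · rintro (h | ⟨k', hk', hp⟩)
      · simp at h
      · rw [Prod.ext_iff] at hp
        simp at hp
        obtain ⟨h1, h2⟩ := hp
        have : k = k' := by omega
        subst this
        simp [hk', h2.symm]
    · intro h
      right
      rw [List.getElem?_eq_some_iff] at h
      obtain ⟨hk, hv⟩ := h
      exact ⟨k, hk, by simp [hv]⟩

-- one swap preserves the index invariant
lemma posInv_swap (arr : List String) (pos : PySem.Dict String (PySem.Set Int)) (a : Nat)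
    (ha : 1 ≤ a) (h2 : a + 1 < arr.length) (hInv : PosInv arr pos)
    (hne : arr[a-1] ≠ arr[a+1]) :
    PosInv ((arr.set (a-1) (arr[a+1])).set (a+1) (arr[a-1]))
      ((pos.modify (arr[a-1]) [] (fun s => (s.discard ((a:Int) - 1)).add ((a:Int) + 1))).modify
        (arr[a+1]) [] (fun s => (s.discard ((a:Int) + 1)).add ((a:Int) - 1))) := by
  have h1 : a - 1 < arr.length := by omega
  set left := arr[a-1] with hl
  set right := arr[a+1] with hr
  have hgl : arr[a-1]? = some left := List.getElem?_eq_getElem h1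
  have hgr : arr[a+1]? = some right := List.getElem?_eq_getElem h2
  have harr : ∀ k : Nat, ((arr.set (a-1) right).set (a+1) left)[k]? =
      if k = a+1 then some left else if k = a-1 then some right else arr[k]? := by
    intro k
    by_cases e1 : k = a+1
    · rw [if_pos e1, ← e1, List.getElem?_set_self (by simpa using (e1 ▸ h2 : k < arr.length))]
    · rw [if_neg e1, List.getElem?_set_ne (fun h => e1 h.symm)]
      by_cases e2 : k = a-1
      · rw [if_pos e2, ← e2, List.getElem?_set_self (e2 ▸ h1 : k < arr.length)]
      · rw [if_neg e2, List.getElem?_set_ne (fun h => e2 h.symm)]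
  intro w
  rw [PySem.Dict.getD_modify]
  by_cases hwr : w = right
  · rw [if_pos hwr, PySem.Dict.getD_modify, if_neg (fun h => hne h.symm)]
    subst hwr
    obtain ⟨hnd, hnn, hmem⟩ := hInv right
    refine ⟨PySem.Set.nodup_add _ _ (PySem.Set.nodup_discard _ _ hnd), ?_, ?_⟩
    · intro j hj
      rw [PySem.Set.mem_add] at hj
      rcases hj with hj | hj
      · exact hnn j (PySem.Set.mem_discard _ _ _ |>.mp hj).1
      · omega
    · intro k
      rw [PySem.Set.mem_add, PySem.Set.mem_discard, hmem, harr]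
      by_cases e1 : k = a+1
      · simp [e1, hne]
        omega
      · by_cases e2 : k = a-1
        · simp [e2]
          omega
        · have c1 : ¬ ((k:Int) = (a:Int) - 1) := by omega
          have c2 : ¬ ((k:Int) = (a:Int) + 1) := by omega
          simp [e1, e2, c1, c2]
  · rw [if_neg hwr, PySem.Dict.getD_modify]
    by_cases hwl : w = left
    · rw [if_pos hwl]
      subst hwl
      obtain ⟨hnd, hnn, hmem⟩ := hInv left
      refine ⟨PySem.Set.nodup_add _ _ (PySem.Set.nodup_discard _ _ hnd), ?_, ?_⟩
      · intro j hj
        rw [PySem.Set.mem_add] at hj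
        rcases hj with hj | hj
        · exact hnn j (PySem.Set.mem_discard _ _ _ |>.mp hj).1
        · omega
      · intro k
        rw [PySem.Set.mem_add, PySem.Set.mem_discard, hmem, harr]
        by_cases e1 : k = a+1
        · simp [e1]
        · by_cases e2 : k = a-1
          · rw [if_neg e1, if_pos e2]
            constructor
            · rintro (⟨_, hx⟩ | hx)
              · exact absurd (by omega : ((k:Int) = (a:Int) - 1)) hx
              · exfalso; omega
            · intro h
              exact absurd (Option.some.inj h) (fun hh => hne hh.symm)
          · have c1 : ¬ ((k:Int) = (a:Int) - 1) := by omega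
            have c2 : ¬ ((k:Int) = (a:Int) + 1) := by omega
            simp [e1, e2, c1, c2]
    · rw [if_neg hwl]
      obtain ⟨hnd, hnn, hmem⟩ := hInv w
      refine ⟨hnd, hnn, ?_⟩
      intro k
      rw [hmem, harr]
      by_cases e1 : k = a+1
      · simp only [e1, if_true]
        rw [← e1]
        constructor
        · intro h; rw [e1, hgr] at h; exact absurd (Option.some.inj h).symm hwr
        · intro h; exact absurd (Option.some.inj h) (fun hh => hwl hh.symm)
      · by_cases e2 : k = a-1
        · simp only [e2, if_neg (by omega : ¬ (a-1 = a+1)), reduceIte]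
          rw [← e2]
          constructor
          · intro h; rw [e2, hgl] at h; exact absurd (Option.some.inj h).symm hwl
          · intro h; exact absurd (Option.some.inj h) (fun hh => hwr hh.symm)
        · simp [e1, e2]

-- B's step computes exactly A's inner-loop body and keeps the invariant and the length
lemma pvSwapStep_spec (n : Int) (arr : List String) (pos : PySem.Dict String (PySem.Set Int))
    (i : Int) (hn : (arr.length : Int) = n) (hi0 : 0 ≤ i) (hin : i < n) (hInv : PosInv arr pos) :
    (pvSwapStep n (arr, pos) i).1 = pyAInner arr i ∧
      PosInv (pvSwapStep n (arr, pos) i).1 (pvSwapStep n (arr, pos) i).2 ∧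
      (pvSwapStep n (arr, pos) i).1.length = arr.length := by
  unfold pvSwapStep pyAInner
  simp only [PySem.List.len_eq, hn]
  by_cases hg : 0 < i ∧ i < n - 1
  · have hg' : i ≠ n - 1 ∧ i ≠ 0 := by omega
    rw [if_pos hg, if_pos hg']
    set a : Nat := i.toNat with ha
    have hai : i = (a : Int) := by omega
    have ha1 : i - 1 = ((a - 1 : Nat) : Int) := by omega
    have ha2 : i + 1 = ((a + 1 : Nat) : Int) := by omega
    have hlen1 : a - 1 < arr.length := by omega
    have hlen2 : a + 1 < arr.length := by omega
    have hget1 : PySem.List.pyGetD arr (i - 1) "" = arr[a-1] := by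
      rw [ha1, PySem.List.pyGetD_natCast, List.getD_eq_getElem?_getD, List.getElem?_eq_getElem hlen1]; rfl
    have hget2 : PySem.List.pyGetD arr (i + 1) "" = arr[a+1] := by
      rw [ha2, PySem.List.pyGetD_natCast, List.getD_eq_getElem?_getD, List.getElem?_eq_getElem hlen2]; rfl
    have hsets : PySem.List.pySetD (PySem.List.pySetD arr (i - 1) (arr[a+1])) (i + 1) (arr[a-1])
        = (arr.set (a-1) (arr[a+1])).set (a+1) (arr[a-1]) := by
      rw [ha1, ha2, PySem.List.pySetD_natCast, PySem.List.pySetD_natCast]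
    by_cases hlr : PySem.List.pyGetD arr (i - 1) "" ≠ PySem.List.pyGetD arr (i + 1) ""
    · rw [if_pos hlr]
      refine ⟨?_, ?_, ?_⟩
      · simp only [hget1, hget2]
      · rw [hai] at hget1 hget2 hsets hlr ⊢
        simp only [hget1, hget2, hsets]
        exact posInv_swap arr pos a (by omega) hlen2 hInv (by rw [hget1, hget2] at hlr; exact hlr)
      · simp only [hget1, hget2, hsets]
        simp
    · rw [if_neg hlr]
      rw [not_not] at hlr
      refine ⟨?_, hInv, rfl⟩
      simp only [hget1, hget2] at hlr ⊢
      rw [hsets]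
      have e1 : arr.set (a-1) (arr[a+1]) = arr := by rw [← hlr]; exact List.set_getElem_self hlen1
      rw [e1, hlr, List.set_getElem_self hlen2]
  · have hg' : ¬ (i ≠ n - 1 ∧ i ≠ 0) := by omega
    rw [if_neg hg, if_neg hg']
    exact ⟨rfl, hInv, rfl⟩

lemma foldl_steps (n : Int) (idxs : List Int) :
    ∀ (arr : List String) (pos : PySem.Dict String (PySem.Set Int)),
      (arr.length : Int) = n → PosInv arr pos → (∀ i ∈ idxs, 0 ≤ i ∧ i < n) →
      (idxs.foldl (pvSwapStep n) (arr, pos)).1 = idxs.foldl pyAInner arr ∧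
        ((idxs.foldl (pvSwapStep n) (arr, pos)).1.length : Int) = n ∧
        PosInv (idxs.foldl (pvSwapStep n) (arr, pos)).1 (idxs.foldl (pvSwapStep n) (arr, pos)).2 := by
  induction idxs with
  | nil => intro arr pos hlen hInv _; exact ⟨rfl, hlen, hInv⟩
  | cons i idxs ih =>
    intro arr pos hlen hInv hmem
    obtain ⟨hi0, hin⟩ := hmem i (by simp)
    obtain ⟨h1, h2, h3⟩ := pvSwapStep_spec n arr pos i hlen hi0 hin hInv
    simp only [List.foldl_cons]
    have hst : pvSwapStep n (arr, pos) i
        = ((pvSwapStep n (arr, pos) i).1, (pvSwapStep n (arr, pos) i).2) := rfl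
    rw [hst]
    obtain ⟨e1, e2, e3⟩ := ih (pvSwapStep n (arr, pos) i).1 (pvSwapStep n (arr, pos) i).2
      (by rw [h3]; exact hlen) h2 (fun j hj => hmem j (by simp [hj]))
    rw [← h1]
    exact ⟨e1, e2, e3⟩

-- under the invariant, B's sorted position snapshot IS A's index comprehension
lemma sorted_getD_eq_indices (arr : List String) (pos : PySem.Dict String (PySem.Set Int))
    (word : String) (hInv : PosInv arr pos) :
    PySem.List.sorted (pos.getD word []) (fun x => x) false
      = (PySem.List.pyRange 0 (PySem.List.len arr) 1).filter
          (fun i => decide (PySem.List.pyGetD arr i "" = word)) := by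
  apply PySem.List.sorted_eq_of_perm_of_pairwise_lt
  · rw [List.perm_ext_iff_of_nodup
      ((PySem.List.nodup_pyRange_one 0 (PySem.List.len arr)).filter _) (hInv word).1]
    intro i
    rw [List.mem_filter, PySem.List.mem_pyRange_one]
    simp only [PySem.List.len_eq, decide_eq_true_eq]
    constructor
    · rintro ⟨⟨hi0, hin⟩, hval⟩
      have hcast : i = ((i.toNat : Nat) : Int) := by omega
      rw [hcast, (hInv word).2.2]
      rw [PySem.List.pyGetD_eq_getElem arr "" hi0 (by simpa using hin)] at hval
      rw [List.getElem?_eq_getElem (by omega), hval]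
    · intro hmem
      have hnn := (hInv word).2.1 i hmem
      have hcast : i = ((i.toNat : Nat) : Int) := by omega
      rw [hcast, (hInv word).2.2] at hmem
      rw [List.getElem?_eq_some_iff] at hmem
      obtain ⟨hk, hv⟩ := hmem
      refine ⟨⟨hnn, by omega⟩, ?_⟩
      rw [PySem.List.pyGetD_eq_getElem arr "" hnn (by simpa using (by omega : i < (arr.length : Int)))]
      rw [← hv]
  · exact (PySem.List.pairwise_lt_pyRange_one 0 (PySem.List.len arr)).filter _

lemma outer (n : Int) (ews : List String) :
    ∀ (arr : List String) (pos : PySem.Dict String (PySem.Set Int)),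
      (arr.length : Int) = n → PosInv arr pos →
      (ews.foldl (pvAltWord n) (arr, pos)).1 = ews.foldl pyAWord arr := by
  induction ews with
  | nil => intro arr pos _ _; rfl
  | cons w ews ih =>
    intro arr pos hlen hInv
    simp only [List.foldl_cons]
    have hw : pvAltWord n (arr, pos) w
        = ((PySem.List.pyRange 0 (PySem.List.len arr) 1).filter
            (fun i => decide (PySem.List.pyGetD arr i "" = w))).foldl (pvSwapStep n) (arr, pos) := by
      unfold pvAltWord
      rw [sorted_getD_eq_indices arr pos w hInv]
    have hmem : ∀ i ∈ (PySem.List.pyRange 0 (PySem.List.len arr) 1).filter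
        (fun i => decide (PySem.List.pyGetD arr i "" = w)), 0 ≤ i ∧ i < n := by
      intro i hi
      have h := (List.mem_filter.mp hi).1
      rw [PySem.List.mem_pyRange_one] at h
      simp only [PySem.List.len_eq] at h
      omega
    obtain ⟨e1, e2, e3⟩ := foldl_steps n _ arr pos hlen hInv hmem
    have hA : pyAWord arr w = ((PySem.List.pyRange 0 (PySem.List.len arr) 1).filter
        (fun i => decide (PySem.List.pyGetD arr i "" = w))).foldl pyAInner arr := rfl
    rw [hw, hA, ← e1]
    rw [show ((PySem.List.pyRange 0 (PySem.List.len arr) 1).filter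
          (fun i => decide (PySem.List.pyGetD arr i "" = w))).foldl (pvSwapStep n) (arr, pos)
        = ((((PySem.List.pyRange 0 (PySem.List.len arr) 1).filter
          (fun i => decide (PySem.List.pyGetD arr i "" = w))).foldl (pvSwapStep n) (arr, pos)).1,
           (((PySem.List.pyRange 0 (PySem.List.len arr) 1).filter
          (fun i => decide (PySem.List.pyGetD arr i "" = w))).foldl (pvSwapStep n) (arr, pos)).2) from rfl]
    exact ih _ _ e2 e3
-- ===== VERDICT (by name: the statement is the Claim_ definition above) =====
theorem swap_words_spec : Claim_equal_swap_words := by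
  intro text error_words _
  unfold Spec_swap_words swap_words swap_words_alt
  by_cases h : ((PySem.Str.split? text " ").getD []).length < 2
  · simp only [if_pos h]
  · simp only [if_neg h]
    exact (outer _ error_words _ _ rfl (posInv_init _)).symm
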